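-- pv_equiv track=rewrite | github.com/boostcampaitech3/level1-image-classification-level1-recsys-08 | code/dataset.py | label_decoder
-- ===== SOURCE A (Python) =====
-- def label_decoder(n:int):
--     d = dict()
--     keys = [(i,j,k) for i in range(3) for j in range(2) for k in range(3)]
--     labels = range(18)
--     for x,y in zip(keys,labels):
--         d[y] = x
--     result = (['Wear','Incorrect','Not Wear'][d[n][0]], ['Male','Female'][d[n][1]], ['<30','30<= & <60','60<='][d[n][2]])
--     return result
-- ===== SOURCE B (Python) =====
-- def label_decoder(n: int):
--     return (['Wear', 'Incorrect', 'Not Wear'][n // 6],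
--             ['Male', 'Female'][(n % 6) // 3],
--             ['<30', '30<= & <60', '60<='][n % 3])
-- ===== Notes on version B (the rewrite author's own statement) =====
-- stated objective: simpler
-- what changed: Replaces the dict built from a triple-nested comprehension and insertion loop with a direct arithmetic decode (floor-division and remainder of n) indexing the three label lists.
import Mathlib
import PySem

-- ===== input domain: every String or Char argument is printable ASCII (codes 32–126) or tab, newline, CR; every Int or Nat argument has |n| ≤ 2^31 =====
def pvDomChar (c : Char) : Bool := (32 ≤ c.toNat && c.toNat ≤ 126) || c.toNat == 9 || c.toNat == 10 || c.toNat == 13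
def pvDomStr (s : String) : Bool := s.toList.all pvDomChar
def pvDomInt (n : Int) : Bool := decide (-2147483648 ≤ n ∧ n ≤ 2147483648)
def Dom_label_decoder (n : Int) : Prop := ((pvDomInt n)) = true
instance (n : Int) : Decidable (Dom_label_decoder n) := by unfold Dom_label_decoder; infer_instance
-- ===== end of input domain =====

-- B replaces A's dict-of-18-triples lookup by a direct arithmetic decode; objective: simpler.

-- ===== PORT A =====
-- literal transliteration: build keys by the triple comprehension, zip with range(18),
-- insert into a dict, then look n up (the dict lookup raises KeyError outside Pre_; ported with getD).
def label_decoder (n : Int) : String × String × String :=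
  let keys : List (Int × Int × Int) :=
    (List.range 3).flatMap (fun i =>
      (List.range 2).flatMap (fun j =>
        (List.range 3).map (fun k => ((i : Int), (j : Int), (k : Int)))))
  let labels : List Int := PySem.List.pyRange 0 18 1
  let d : PySem.Dict Int (Int × Int × Int) :=
    (keys.zip labels).foldl (fun d xy => d.insert xy.2 xy.1) PySem.Dict.empty
  let t := d.getD n (0, 0, 0)
  (PySem.List.pyGetD ["Wear", "Incorrect", "Not Wear"] t.1 "",
   PySem.List.pyGetD ["Male", "Female"] t.2.1 "",
   PySem.List.pyGetD ["<30", "30<= & <60", "60<="] t.2.2 "")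

-- ===== PORT B =====
def label_decoder_alt (n : Int) : String × String × String :=
  (PySem.List.pyGetD ["Wear", "Incorrect", "Not Wear"] (PySem.Int.floordiv n 6) "",
   PySem.List.pyGetD ["Male", "Female"] (PySem.Int.floordiv (PySem.Int.mod n 6) 3) "",
   PySem.List.pyGetD ["<30", "30<= & <60", "60<="] (PySem.Int.mod n 3) "")

-- ===== PRECONDITION & SPEC =====
-- Pre_ excludes exactly the inputs where A raises KeyError (n not a key of the 18-entry dict).
def Pre_label_decoder (n : Int) : Prop := 0 ≤ n ∧ n < 18
instance (n : Int) : Decidable (Pre_label_decoder n) := by unfold Pre_label_decoder; infer_instance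
def pvWitness_label_decoder : Int := (7)
def Spec_label_decoder (n : Int) (out : String × String × String) : Prop := out = label_decoder_alt n
instance (n : Int) (out : String × String × String) : Decidable (Spec_label_decoder n out) := by unfold Spec_label_decoder; infer_instance

-- ===== CLAIM (what is proved, stated in full; the proofs are below) =====
def Claim_equal_label_decoder : Prop := ∀ (n : Int), Dom_label_decoder n → Pre_label_decoder n → Spec_label_decoder n (label_decoder n)

-- ===== LEMMAS AND PROOFS =====

-- ===== VERDICT (by name: the statement is the Claim_ definition above) =====
theorem label_decoder_spec : Claim_equal_label_decoder := by
  intro n _ hpre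
  obtain ⟨h0, h18⟩ := hpre
  interval_cases n <;> decide
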